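-- pv_equiv track=rewrite | github.com/j-wut/advent-2024 | d2/day-2.py | isIncreasing
-- ===== SOURCE A (Python) =====
-- def isIncreasing(input: list[int], limit: int, dampener: int = 0):
--   for i in range(1,len(input)):
--     if input[i] <= input[i-1] or input[i] - input[i-1] > limit:
--       if dampener:
--         return isIncreasing(input[0:i]+input[i+1:], limit, dampener - 1) or isIncreasing(input[0:i-1] + input[i:], limit, dampener - 1)
--       else:
--         return False
--   return True
-- ===== SOURCE B (Python) =====
-- def remove_at(seq, i):
--     return seq[:i] + seq[i+1:]
--
-- def find_violation(seq, limit):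
--     for j in range(len(seq) - 1):
--         if seq[j+1] <= seq[j] or seq[j+1] - seq[j] > limit:
--             return j
--     return None
--
-- def isIncreasing(input, limit, dampener=0):
--     stack = [(input, dampener)]
--     while stack:
--         seq, d = stack.pop()
--         v = find_violation(seq, limit)
--         if v is None:
--             return True
--         if d:
--             stack.append((remove_at(seq, v + 1), d - 1))
--             stack.append((remove_at(seq, v), d - 1))
--     return False
-- ===== Notes on version B (the rewrite author's own statement) =====
-- stated objective: alternative
-- what changed: Replaces A's two-way recursion with an explicit worklist of (sublist, remaining-dampener) states plus a separate first-violation scan: pop a state, scan it, return True on no violation, otherwise push the two one-element-removed variants; False when the worklist empties.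
import Mathlib
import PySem

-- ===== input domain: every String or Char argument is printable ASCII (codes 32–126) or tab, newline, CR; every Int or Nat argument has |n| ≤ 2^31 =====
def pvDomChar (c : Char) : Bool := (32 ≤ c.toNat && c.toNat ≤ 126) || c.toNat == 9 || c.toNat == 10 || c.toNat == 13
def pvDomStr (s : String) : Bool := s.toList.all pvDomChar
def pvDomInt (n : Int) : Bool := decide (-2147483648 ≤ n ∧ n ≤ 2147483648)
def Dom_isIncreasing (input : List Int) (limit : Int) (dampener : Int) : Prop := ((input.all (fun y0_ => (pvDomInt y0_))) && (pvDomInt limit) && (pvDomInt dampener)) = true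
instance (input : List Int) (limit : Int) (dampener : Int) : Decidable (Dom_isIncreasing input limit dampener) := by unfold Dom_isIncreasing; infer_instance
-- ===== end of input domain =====

-- B replaces A's two-way recursion by an explicit worklist of (sublist, remaining-dampener)
-- states with a separate first-violation scan (objective: alternative decomposition, same cost).

-- slice arithmetic used by both ports' termination proofs (cited by name in decreasing_by)
theorem pv_rm_eq (xs : List Int) (j : Nat) :
    PySem.List.slice xs (some (0:Int)) (some (j:Int)) ++ PySem.List.slice xs (some ((j:Int)+1)) none
      = xs.take j ++ xs.drop (j+1) := by
  have h1 : ((j:Int)+1) = (((j+1:Nat)):Int) := by push_cast; ring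
  rw [h1, PySem.List.slice_zero_start, PySem.List.slice_to_natCast, PySem.List.slice_from_natCast]

theorem pv_rm_eq' (xs : List Int) (j : Nat) :
    PySem.List.slice xs (some (0:Int)) (some ((j:Int)+1)) ++ PySem.List.slice xs (some ((j:Int)+2)) none
      = xs.take (j+1) ++ xs.drop (j+2) := by
  have h1 : ((j:Int)+1) = (((j+1:Nat)):Int) := by push_cast; ring
  have h2 : ((j:Int)+2) = (((j+1:Nat)):Int)+1 := by push_cast; ring
  rw [h1, h2, pv_rm_eq]

theorem pv_len_rm (xs : List Int) (j : Nat) (h : j + 1 < xs.length) :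
    (xs.take j ++ xs.drop (j+1)).length = xs.length - 1 := by
  simp; omega

theorem pv_len_rm' (xs : List Int) (j : Nat) (h : j + 1 < xs.length) :
    (xs.take (j+1) ++ xs.drop (j+2)).length = xs.length - 1 := by
  simp; omega

-- ===== PORT A =====
-- A's for-loop over i ∈ range(1, len) is the structural recursion below on j = i-1;
-- input[0:i]+input[i+1:] and input[0:i-1]+input[i:] are PySem slices.
def isIncAux (input : List Int) (limit : Int) (dampener : Int) (j : Nat) : Bool :=
  if h : j + 1 < input.length then
    if input.getD (j+1) 0 ≤ input.getD j 0 ∨ input.getD (j+1) 0 - input.getD j 0 > limit then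
      if dampener ≠ 0 then
        isIncAux (PySem.List.slice input (some (0:Int)) (some ((j:Int)+1)) ++ PySem.List.slice input (some ((j:Int)+2)) none) limit (dampener - 1) 0
        || isIncAux (PySem.List.slice input (some (0:Int)) (some (j:Int)) ++ PySem.List.slice input (some ((j:Int)+1)) none) limit (dampener - 1) 0
      else false
    else isIncAux input limit dampener (j+1)
  else true
termination_by (input.length, input.length - j)
decreasing_by
  · apply Prod.Lex.left; rw [pv_rm_eq', pv_len_rm' _ _ h]; omega
  · apply Prod.Lex.left; rw [pv_rm_eq, pv_len_rm _ _ h]; omega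
  · apply Prod.Lex.right; omega

def isIncreasing (input : List Int) (limit : Int) (dampener : Int) : Bool :=
  isIncAux input limit dampener 0

-- ===== PORT B =====
-- Source B helper remove_at(seq, i) = seq[:i] + seq[i+1:]
def removeAt (seq : List Int) (i : Nat) : List Int :=
  PySem.List.slice seq (some (0:Int)) (some (i:Int)) ++ PySem.List.slice seq (some ((i:Int)+1)) none

-- Source B helper find_violation: first j with seq[j+1] <= seq[j] or seq[j+1]-seq[j] > limit
def findViol (limit : Int) (seq : List Int) (j : Nat) : Option Nat :=
  if h : j + 1 < seq.length then
    if seq.getD (j+1) 0 ≤ seq.getD j 0 ∨ seq.getD (j+1) 0 - seq.getD j 0 > limit then some j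
    else findViol limit seq (j+1)
  else none
termination_by seq.length - j

theorem findViol_some {limit : Int} {seq : List Int} {j v : Nat}
    (h : findViol limit seq j = some v) : j ≤ v ∧ v + 1 < seq.length := by
  fun_induction findViol limit seq j with
  | case1 j h hc => simp_all
  | case2 j h hc ih => have := ih h; omega
  | case3 j h => simp_all

-- Source B main loop: pop a state, scan, return True / discard / push the two shortened variants
def loopB (limit : Int) (stack : List (List Int × Int)) : Bool :=
  match stack with
  | [] => false
  | (seq, d) :: rest =>
    match hv : findViol limit seq 0 with
    | none => true
    | some v =>
      if d ≠ 0 then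
        loopB limit ((removeAt seq v, d - 1) :: (removeAt seq (v+1), d - 1) :: rest)
      else
        loopB limit rest
termination_by (stack.map (fun p => 3 ^ p.1.length)).sum
decreasing_by
  · have hb := (findViol_some hv).2
    simp only [List.map_cons, List.sum_cons, removeAt, pv_rm_eq,
      pv_len_rm _ _ hb, pv_len_rm' _ _ hb]
    have h3 : 3 ^ seq.length = 3 * 3 ^ (seq.length - 1) := by
      rw [← pow_succ']; congr 1; omega
    have hp : 0 < 3 ^ (seq.length - 1) := pow_pos (by norm_num) _
    omega
  · simp only [List.map_cons, List.sum_cons]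
    have hp : 0 < 3 ^ seq.length := pow_pos (by norm_num) _
    omega

def isIncreasing_alt (input : List Int) (limit : Int) (dampener : Int) : Bool :=
  loopB limit [(input, dampener)]

-- ===== PRECONDITION & SPEC =====
def Spec_isIncreasing (input : List Int) (limit : Int) (dampener : Int) (out : Bool) : Prop := out = isIncreasing_alt input limit dampener
instance (input : List Int) (limit : Int) (dampener : Int) (out : Bool) : Decidable (Spec_isIncreasing input limit dampener out) := by unfold Spec_isIncreasing; infer_instance

-- ===== CLAIM (what is proved, stated in full; the proofs are below) =====
def Claim_equal_isIncreasing : Prop := ∀ (input : List Int) (limit : Int) (dampener : Int), Dom_isIncreasing input limit dampener → Spec_isIncreasing input limit dampener (isIncreasing input limit dampener)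

-- ===== LEMMAS AND PROOFS =====

-- A's loop body, characterised through B's violation scan
theorem isIncAux_eq (input : List Int) (limit dampener : Int) (j : Nat) :
    isIncAux input limit dampener j =
      match findViol limit input j with
      | none => true
      | some v =>
        if dampener ≠ 0 then
          isIncAux (input.take (v+1) ++ input.drop (v+2)) limit (dampener - 1) 0
          || isIncAux (input.take v ++ input.drop (v+1)) limit (dampener - 1) 0
        else false := by
  fun_induction findViol limit input j with
  | case1 j h hc =>
    rw [isIncAux]
    simp only [h, dif_pos, hc, if_pos, pv_rm_eq, pv_rm_eq']
  | case2 j h hc ih =>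
    rw [isIncAux]
    simp only [h, dif_pos, hc]
    exact ih
  | case3 j h =>
    rw [isIncAux]
    simp [h]

-- the worklist returns true iff some state on it passes A's check
theorem loopB_any (limit : Int) (stack : List (List Int × Int)) :
    loopB limit stack = stack.any (fun p => isIncAux p.1 limit p.2 0) := by
  fun_induction loopB limit stack with
  | case1 => simp
  | case2 seq d rest hv =>
    simp only [List.any_cons]
    rw [isIncAux_eq, hv]
    simp
  | case3 seq d rest v hv hd ih =>
    have hseq : isIncAux seq limit d 0
        = (isIncAux (seq.take (v+1) ++ seq.drop (v+2)) limit (d-1) 0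
           || isIncAux (seq.take v ++ seq.drop (v+1)) limit (d-1) 0) := by
      rw [isIncAux_eq, hv]; simp [hd]
    have h11 : v + 1 + 1 = v + 2 := rfl
    rw [ih]
    simp only [List.any_cons, removeAt, pv_rm_eq, h11, hseq]
    cases isIncAux (seq.take (v+1) ++ seq.drop (v+2)) limit (d-1) 0 <;>
      cases isIncAux (seq.take v ++ seq.drop (v+1)) limit (d-1) 0 <;> simp
  | case4 seq d rest v hv hd ih =>
    rw [ih]
    simp only [List.any_cons]
    rw [isIncAux_eq, hv]
    simp_all

-- ===== VERDICT (by name: the statement is the Claim_ definition above) =====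
theorem isIncreasing_spec : Claim_equal_isIncreasing := by
  intro input limit dampener _
  unfold Spec_isIncreasing isIncreasing isIncreasing_alt
  rw [loopB_any]
  simp
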